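-- pv_equiv track=rewrite | github.com/liviu-gheorghe/ASC_Homework0x00_Project | crack_woi.py | getDataGroups
-- ===== SOURCE A (Python) =====
-- def getDataGroups(bin_data, keylen):
--     dict_data = {}
--     i = 0
--     for byte in bin_data:
--         dict_key = i % keylen
--         if dict_key not in dict_data:
--             dict_data[dict_key] = []
--
--         dict_data[i%keylen].append(byte)
--         i += 1
--
--     return dict_data
-- ===== SOURCE B (Python) =====
-- def getDataGroups(bin_data, keylen):
--     keys = dict.fromkeys(i % keylen for i in range(len(bin_data)))
--     return {k: [b for i, b in enumerate(bin_data) if i % keylen == k] for k in keys}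
-- ===== Notes on version B (the rewrite author's own statement) =====
-- stated objective: alternative
-- what changed: B first collects the distinct residue keys with dict.fromkeys and then builds each bucket in one filtering comprehension per key, instead of A's single pass that grows dict entries one append at a time; Pre_ excludes only keylen == 0 with non-empty input, where A raises ZeroDivisionError.
import Mathlib
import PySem

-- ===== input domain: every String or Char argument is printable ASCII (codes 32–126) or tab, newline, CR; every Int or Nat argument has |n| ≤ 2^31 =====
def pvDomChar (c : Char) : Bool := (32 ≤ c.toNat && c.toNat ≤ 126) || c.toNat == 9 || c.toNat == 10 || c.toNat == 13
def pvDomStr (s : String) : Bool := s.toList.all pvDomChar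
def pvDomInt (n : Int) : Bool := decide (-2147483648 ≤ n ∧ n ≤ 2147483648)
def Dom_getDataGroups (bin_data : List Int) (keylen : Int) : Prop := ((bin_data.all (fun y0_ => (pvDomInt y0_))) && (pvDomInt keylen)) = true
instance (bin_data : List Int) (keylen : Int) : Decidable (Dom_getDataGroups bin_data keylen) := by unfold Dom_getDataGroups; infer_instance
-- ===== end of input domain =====

-- B collects the distinct residue keys first and then builds each bucket by a filtering pass per key, instead of A's one-pass append loop (alternative algorithm).


-- ===== PORT A =====
-- Literal port of A: a dict and a running index i; per byte, ensure the key
-- i % keylen exists, then append the byte to its bucket (the append is the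
-- modify of the bucket list — the key is always present at that point).
def getDataGroups (bin_data : List Int) (keylen : Int) : List (Int × List Int) :=
  (bin_data.foldl
    (fun (st : PySem.Dict Int (List Int) × Int) byte =>
      let dict_key := PySem.Int.mod st.2 keylen
      let d := if st.1.contains dict_key then st.1 else st.1.insert dict_key ([] : List Int)
      (d.modify (PySem.Int.mod st.2 keylen) [] (fun l => l ++ [byte]), st.2 + 1))
    (PySem.Dict.empty, 0)).1.items

-- ===== PORT B =====
-- Literal port of Source B: keys = dict.fromkeys(i % keylen for i in range(len(bin_data)))
-- (= PySem.List.dedup of the mapped range), then a dict comprehension whose value for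
-- key k is the filtering comprehension over enumerate(bin_data).
def getDataGroups_alt (bin_data : List Int) (keylen : Int) : List (Int × List Int) :=
  let keys : List Int :=
    PySem.List.dedup ((PySem.List.pyRange 0 (PySem.List.len bin_data) 1).map
      (fun i => PySem.Int.mod i keylen))
  (keys.foldl
    (fun (d : PySem.Dict Int (List Int)) k =>
      d.insert k (((PySem.List.enumerate bin_data 0).filter
        (fun p => PySem.Int.mod p.1 keylen == k)).map (fun p => p.2)))
    PySem.Dict.empty).items

-- ===== PRECONDITION & SPEC =====
-- Pre_ excludes only the inputs where A raises: keylen == 0 with non-empty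
-- bin_data hits 'i % 0' (ZeroDivisionError); A returns on everything else.
def Pre_getDataGroups (bin_data : List Int) (keylen : Int) : Prop :=
  keylen ≠ 0 ∨ bin_data = []
instance (bin_data : List Int) (keylen : Int) : Decidable (Pre_getDataGroups bin_data keylen) := by unfold Pre_getDataGroups; infer_instance
def pvWitness_getDataGroups : List Int × Int := ([65, 66, 67, 68, 69], 2)

def Spec_getDataGroups (bin_data : List Int) (keylen : Int) (out : List (Int × List Int)) : Prop := out = getDataGroups_alt bin_data keylen
instance (bin_data : List Int) (keylen : Int) (out : List (Int × List Int)) : Decidable (Spec_getDataGroups bin_data keylen out) := by unfold Spec_getDataGroups; infer_instance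

-- ===== CLAIM (what is proved, stated in full; the proofs are below) =====
def Claim_equal_getDataGroups : Prop := ∀ (bin_data : List Int) (keylen : Int), Dom_getDataGroups bin_data keylen → Pre_getDataGroups bin_data keylen → Spec_getDataGroups bin_data keylen (getDataGroups bin_data keylen)

-- ===== LEMMAS AND PROOFS =====

-- A's 'ensure key then append' step equals a plain modify-with-default-[] step.
lemma pvStepA (d : PySem.Dict Int (List Int)) (c : Int) (b : Int) :
    (if d.contains c then d else d.insert c ([] : List Int)).modify c [] (fun l => l ++ [b])
      = d.modify c [] (fun l => l ++ [b]) := by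
  by_cases h : d.contains c
  · rw [if_pos h]
  · rw [if_neg h]
    simp only [PySem.Dict.modify]
    rw [PySem.Dict.insert_insert_self, PySem.Dict.getD_insert_self,
        PySem.Dict.getD_of_not_contains _ _ (by simpa using h)]

-- A's fold over bytes with a counter = a fold over the enumerated list.
lemma pvFoldA (k : Int) (xs : List Int) (d : PySem.Dict Int (List Int)) (i : Int) :
    (xs.foldl
      (fun (st : PySem.Dict Int (List Int) × Int) byte =>
        (st.1.modify (PySem.Int.mod st.2 k) [] (fun l => l ++ [byte]), st.2 + 1))
      (d, i)).1
    = (PySem.List.enumerate xs i).foldl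
        (fun d p => d.modify (PySem.Int.mod p.1 k) [] (fun l => l ++ [p.2])) d := by
  induction xs generalizing d i with
  | nil => simp [PySem.List.enumerate_nil]
  | cons x t ih => simp [PySem.List.enumerate_cons, List.foldl_cons, ih]

lemma pvMain (bin_data : List Int) (keylen : Int) :
    getDataGroups bin_data keylen = getDataGroups_alt bin_data keylen := by
  have hfun : (fun (st : PySem.Dict Int (List Int) × Int) (byte : Int) =>
      let dict_key := PySem.Int.mod st.2 keylen
      let d := if st.1.contains dict_key then st.1 else st.1.insert dict_key ([] : List Int)
      (d.modify (PySem.Int.mod st.2 keylen) [] (fun l => l ++ [byte]), st.2 + 1))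
      = (fun (st : PySem.Dict Int (List Int) × Int) (byte : Int) =>
          (st.1.modify (PySem.Int.mod st.2 keylen) [] (fun l => l ++ [byte]), st.2 + 1)) := by
    funext st byte
    simp only
    rw [pvStepA]
  have hE : PySem.List.enumerate bin_data 0
      = (PySem.List.pyRange 0 (PySem.List.len bin_data) 1).map
          (fun j => (j, PySem.List.pyGetD bin_data j 0)) :=
    PySem.List.enumerate_eq_map_pyRange bin_data 0
  -- A as a fold over the index range
  have hA : getDataGroups bin_data keylen
      = ((PySem.List.pyRange 0 (PySem.List.len bin_data) 1).foldl
          (fun d j => d.modify (PySem.Int.mod j keylen) []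
            (fun l => l ++ [PySem.List.pyGetD bin_data j 0]))
          PySem.Dict.empty).items := by
    unfold getDataGroups
    rw [hfun, pvFoldA, hE, List.foldl_map]
  have hnd0 : (((PySem.List.pyRange 0 (PySem.List.len bin_data) 1).foldl
          (fun d j => d.modify (PySem.Int.mod j keylen) []
            (fun l => l ++ [PySem.List.pyGetD bin_data j 0]))
          PySem.Dict.empty)).keys.Nodup :=
    PySem.Dict.nodup_keys_foldl_modify_key _ (fun j => PySem.Int.mod j keylen) _
      (fun d j => fun l => l ++ [PySem.List.pyGetD bin_data j 0]) _ PySem.Dict.nodup_keys_empty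
  -- A's key list is exactly B's dedup'd key list
  have hkeys : (((PySem.List.pyRange 0 (PySem.List.len bin_data) 1).foldl
          (fun d j => d.modify (PySem.Int.mod j keylen) []
            (fun l => l ++ [PySem.List.pyGetD bin_data j 0]))
          PySem.Dict.empty)).keys
      = PySem.List.dedup ((PySem.List.pyRange 0 (PySem.List.len bin_data) 1).map
          (fun i => PySem.Int.mod i keylen)) := by
    rw [PySem.Dict.keys_foldl_modify_key _ (fun j => PySem.Int.mod j keylen) _
      (fun d j => fun l => l ++ [PySem.List.pyGetD bin_data j 0]) _,
      PySem.List.dedup_eq_ofList]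
    rfl
  -- A's bucket for key c
  have hgetD : ∀ c : Int, (((PySem.List.pyRange 0 (PySem.List.len bin_data) 1).foldl
          (fun d j => d.modify (PySem.Int.mod j keylen) []
            (fun l => l ++ [PySem.List.pyGetD bin_data j 0]))
          PySem.Dict.empty)).getD c []
      = (((PySem.List.pyRange 0 (PySem.List.len bin_data) 1).filter
            (fun j => PySem.Int.mod j keylen == c)).map
          (fun j => PySem.List.pyGetD bin_data j 0)) := by
    intro c
    have hDA : ((PySem.List.pyRange 0 (PySem.List.len bin_data) 1).map
          (fun j => (PySem.Int.mod j keylen, PySem.List.pyGetD bin_data j 0))).foldl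
          (fun d (p : Int × Int) => d.modify p.1 [] (fun l => l ++ [p.2])) PySem.Dict.empty
        = (PySem.List.pyRange 0 (PySem.List.len bin_data) 1).foldl
            (fun d j => d.modify (PySem.Int.mod j keylen) []
              (fun l => l ++ [PySem.List.pyGetD bin_data j 0])) PySem.Dict.empty := by
      rw [List.foldl_map]
    rw [← hDA, PySem.Dict.getD_foldl_modify_append, PySem.Dict.getD_empty, List.filter_map,
        List.map_map]
    rfl
  -- B's fold over fresh distinct keys appends its pairs
  have hB : getDataGroups_alt bin_data keylen
      = (PySem.List.dedup ((PySem.List.pyRange 0 (PySem.List.len bin_data) 1).map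
            (fun i => PySem.Int.mod i keylen))).map
          (fun k => (k, ((PySem.List.enumerate bin_data 0).filter
            (fun p => PySem.Int.mod p.1 keylen == k)).map (fun p => p.2))) := by
    unfold getDataGroups_alt
    simp only
    rw [PySem.Dict.items_foldl_insert_fresh _ (fun k => k) _ _
        (fun a _ => PySem.Dict.contains_empty _) (by simp)]
    rfl
  rw [hA, hB, PySem.Dict.items_eq_map_keys _ hnd0 ([] : List Int), hkeys]
  apply List.map_congr_left
  intro k _
  rw [hgetD, hE, List.filter_map, List.map_map]
  rfl

-- ===== VERDICT (by name: the statement is the Claim_ definition above) =====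
theorem getDataGroups_spec : Claim_equal_getDataGroups := by
  intro bin_data keylen _ _
  exact pvMain bin_data keylen
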